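-- pv_equiv track=rewrite | github.com/LeohomZhang/MIT_60001 | hangman_complete.py | match_with_gaps
-- ===== SOURCE A (Python) =====
-- def match_with_gaps(my_word, other_word):
--     '''
--     my_word: string with _ characters, current guess of secret word
--     other_word: string, regular English word
--     returns: boolean, True if all the actual letters of my_word match the
--         corresponding letters of other_word, or the letter is the special symbol
--         _ , and my_word and other_word are of the same length;
--         False otherwise:
--     '''
--     # FILL IN YOUR CODE HERE AND DELETE "pass"
--     #my_word=my_word.strip(" ")
--     check2=True
--     if len(my_word)==len(other_word):
--         for i in range(len(my_word)):
--             if my_word[i]=="_":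
--                 pass
--             elif not my_word[i] == other_word[i]:
--                 check2=False
--     else:
--         return False
--     return check2
-- ===== SOURCE B (Python) =====
-- def match_with_gaps(my_word, other_word):
--     if len(my_word) != len(other_word):
--         return False
--     rest = other_word
--     for seg in my_word.split("_"):
--         if not rest.startswith(seg):
--             return False
--         rest = rest[len(seg) + 1:]
--     return True
-- ===== Notes on version B (the rewrite author's own statement) =====
-- stated objective: faster
-- what changed: Replaces A's per-index flag loop by a segment-matching algorithm: split my_word on '_' into fixed segments and walk other_word once, checking each segment is a prefix of the remainder and skipping one character per gap.
import Mathlib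
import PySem

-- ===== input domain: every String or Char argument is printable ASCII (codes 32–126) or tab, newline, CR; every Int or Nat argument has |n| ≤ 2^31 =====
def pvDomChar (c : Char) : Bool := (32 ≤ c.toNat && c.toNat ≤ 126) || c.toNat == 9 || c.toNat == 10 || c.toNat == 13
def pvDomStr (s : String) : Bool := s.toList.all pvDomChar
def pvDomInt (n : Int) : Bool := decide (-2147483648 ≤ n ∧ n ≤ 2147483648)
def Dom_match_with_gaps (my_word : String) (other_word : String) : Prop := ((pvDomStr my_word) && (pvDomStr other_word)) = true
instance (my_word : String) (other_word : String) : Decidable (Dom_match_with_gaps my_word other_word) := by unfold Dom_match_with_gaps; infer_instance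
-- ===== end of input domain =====

-- B replaces A's per-index flag loop by segment matching: split my_word on '_' and
-- walk other_word once, checking each segment as a prefix and skipping one char per gap.

-- ===== PORT A =====
def match_with_gaps (my_word : String) (other_word : String) : Bool :=
  -- check2 = True; if lengths equal, loop i over range(len), clearing check2 on mismatch; else return False
  if my_word.toList.length = other_word.toList.length then
    (List.range my_word.toList.length).foldl (fun check2 i =>
      if my_word.toList.getD i ' ' = '_' then check2
      else if ¬ (my_word.toList.getD i ' ' = other_word.toList.getD i ' ') then false
      else check2) true
  else false

-- ===== PORT B =====
-- for seg in my_word.split("_"): if not rest.startswith(seg): return False; rest = rest[len(seg)+1:]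
-- rest[len(seg)+1:] with a nonnegative start is exactly List.drop (seg.length+1).
def pvSegLoop (segs : List (List Char)) (rest : List Char) : Bool :=
  match segs with
  | [] => true
  | seg :: segs =>
    if PySem.Chars.startswith rest seg then pvSegLoop segs (rest.drop (seg.length + 1))
    else false

def match_with_gaps_alt (my_word : String) (other_word : String) : Bool :=
  if my_word.toList.length ≠ other_word.toList.length then false
  else pvSegLoop (PySem.Chars.splitOn my_word.toList "_".toList) other_word.toList

-- ===== PRECONDITION & SPEC =====
def Spec_match_with_gaps (my_word : String) (other_word : String) (out : Bool) : Prop := out = match_with_gaps_alt my_word other_word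
instance (my_word : String) (other_word : String) (out : Bool) : Decidable (Spec_match_with_gaps my_word other_word out) := by unfold Spec_match_with_gaps; infer_instance

-- ===== CLAIM (what is proved, stated in full; the proofs are below) =====
def Claim_equal_match_with_gaps : Prop := ∀ (my_word : String) (other_word : String), Dom_match_with_gaps my_word other_word → Spec_match_with_gaps my_word other_word (match_with_gaps my_word other_word)

-- ===== LEMMAS AND PROOFS =====

-- Simple structural model of splitting on the single character '_'.
def mySplit : List Char → List (List Char)
  | [] => [[]]
  | c :: m =>
    if c = '_' then [] :: mySplit m
    else
      match mySplit m with
      | [] => [[c]]        -- unreachable: mySplit never returns []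
      | s0 :: rest => (c :: s0) :: rest

theorem mySplit_ne_nil (l : List Char) : mySplit l ≠ [] := by
  cases l with
  | nil => simp [mySplit]
  | cons c m =>
    simp only [mySplit]
    split_ifs
    · simp
    · cases h : mySplit m <;> simp

-- PySem's fuel-based splitOn.go, specialised to sep = ['_'], computes mySplit.
theorem go_eq_mySplit : ∀ (fuel : Nat) (l cur : List Char) (acc : List (List Char)),
    l.length ≤ fuel →
    PySem.Chars.splitOn.go ['_'] fuel l cur acc
      = acc.reverse ++ (mySplit l).modifyHead (cur.reverse ++ ·) := by
  intro fuel
  induction fuel with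
  | zero =>
    intro l cur acc h
    have hl : l = [] := by cases l <;> simp_all
    subst hl
    simp [PySem.Chars.splitOn.go, mySplit]
  | succ fuel ih =>
    intro l cur acc h
    cases l with
    | nil => simp [PySem.Chars.splitOn.go, mySplit]
    | cons c rest =>
      rw [show PySem.Chars.splitOn.go ['_'] (fuel + 1) (c :: rest) cur acc
          = (if (['_'] : List Char).isPrefixOf (c :: rest) then
              PySem.Chars.splitOn.go ['_'] fuel (List.drop 1 (c :: rest)) [] (List.reverse cur :: acc)
            else PySem.Chars.splitOn.go ['_'] fuel rest (c :: cur) acc) from rfl]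
      have hlen : rest.length ≤ fuel := by simpa using h
      by_cases hc : c = '_'
      · subst hc
        rw [if_pos (by simp [List.isPrefixOf])]
        rw [List.drop_one, List.tail_cons, ih rest [] _ hlen]
        rw [show mySplit ('_' :: rest) = [] :: mySplit rest from by simp [mySplit]]
        cases mySplit rest <;> simp [List.modifyHead]
      · rw [if_neg (by simp [List.isPrefixOf]; exact fun h => hc h.symm)]
        rw [ih rest (c :: cur) acc hlen]
        have hne := mySplit_ne_nil rest
        cases hs : mySplit rest with
        | nil => exact absurd hs hne
        | cons s0 r =>
          rw [show mySplit (c :: rest) = (c :: s0) :: r from by simp [mySplit, hc, hs]]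
          simp [List.modifyHead]

theorem splitOn_eq_mySplit (l : List Char) :
    PySem.Chars.splitOn l ['_'] = mySplit l := by
  rw [PySem.Chars.splitOn, go_eq_mySplit (l.length + 1) l [] [] (by omega)]
  cases mySplit l <;> simp [List.modifyHead]

-- A's loop body only ever keeps or clears the flag.
theorem foldl_flag (P Q : Nat → Prop) [DecidablePred P] [DecidablePred Q] (l : List Nat) :
    ∀ b : Bool, l.foldl (fun check2 i =>
      if P i then check2 else if ¬ Q i then false else check2) b
      = (b && l.all (fun i => decide (P i) || decide (Q i))) := by
  induction l with
  | nil => intro b; simp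
  | cons a l ih =>
    intro b
    simp only [List.foldl_cons, List.all_cons, ih]
    by_cases hP : P a <;> by_cases hQ : Q a <;> simp [hP, hQ]

-- Index-wise scan over range = scan over the zipped lists, when the lengths agree.
theorem range_all_zip (m : List Char) :
    ∀ o : List Char, m.length = o.length →
    (List.range m.length).all (fun i =>
        decide (m.getD i ' ' = '_') || decide (m.getD i ' ' = o.getD i ' '))
      = (m.zip o).all (fun p => p.1 == '_' || p.1 == p.2) := by
  induction m with
  | nil => intro o h; simp
  | cons a m ih =>
    intro o h
    cases o with
    | nil => simp at h
    | cons b o =>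
      simp only [List.length_cons, List.range_succ_eq_map, List.all_cons, List.all_map,
        List.zip_cons_cons, Function.comp_def, List.getD_cons_zero, List.getD_cons_succ]
      rw [ih o (by simpa using h)]
      simp [Bool.beq_eq_decide_eq]

-- Segment matching over mySplit = the pointwise wildcard check, when the lengths agree.
theorem segLoop_eq_zip (m : List Char) :
    ∀ o : List Char, m.length = o.length →
    pvSegLoop (mySplit m) o = (m.zip o).all (fun p => p.1 == '_' || p.1 == p.2) := by
  induction m with
  | nil =>
    intro o h
    cases o with
    | nil => simp [mySplit, pvSegLoop, PySem.Chars.startswith]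
    | cons b o => simp at h
  | cons c m ih =>
    intro o h
    cases o with
    | nil => simp at h
    | cons b o =>
      have h' : m.length = o.length := by simpa using h
      by_cases hc : c = '_'
      · subst hc
        rw [show mySplit ('_' :: m) = [] :: mySplit m from by simp [mySplit]]
        simp only [pvSegLoop]
        have hsw : PySem.Chars.startswith (b :: o) [] = true := by
          rw [PySem.Chars.startswith_iff]; exact List.nil_prefix
        rw [if_pos hsw]
        simp only [List.length_nil, Nat.zero_add, List.drop_one, List.tail_cons,
          List.zip_cons_cons, List.all_cons]
        rw [ih o h']
        simp
      · have hne := mySplit_ne_nil m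
        cases hs : mySplit m with
        | nil => exact absurd hs hne
        | cons s0 rest =>
          simp only [mySplit, if_neg hc, hs, pvSegLoop]
          have hpre : PySem.Chars.startswith (b :: o) (c :: s0)
              = ((c == b) && PySem.Chars.startswith o s0) := by
            simp [PySem.Chars.startswith, List.isPrefixOf]
          have hrec : pvSegLoop (mySplit m) o
              = (if PySem.Chars.startswith o s0 then pvSegLoop rest (o.drop (s0.length + 1)) else false) := by
            rw [hs]; rfl
          have goal2 : ((c :: m).zip (b :: o)).all (fun p => p.1 == '_' || p.1 == p.2)
              = ((c == b) && pvSegLoop (mySplit m) o) := by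
            rw [List.zip_cons_cons, List.all_cons, ih o h']
            simp [Bool.beq_eq_decide_eq, hc]
          rw [hpre, show (b :: o).drop ((c :: s0).length + 1) = o.drop (s0.length + 1) from by simp,
            goal2, hrec]
          cases (c == b) <;> cases hsw : PySem.Chars.startswith o s0 <;> simp

-- ===== VERDICT (by name: the statement is the Claim_ definition above) =====
theorem match_with_gaps_spec : Claim_equal_match_with_gaps := by
  intro my_word other_word _
  unfold Spec_match_with_gaps match_with_gaps match_with_gaps_alt
  by_cases h : my_word.toList.length = other_word.toList.length
  · rw [if_pos h, if_neg (by simpa using h),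
      foldl_flag (fun i => my_word.toList.getD i ' ' = '_')
        (fun i => my_word.toList.getD i ' ' = other_word.toList.getD i ' '),
      Bool.true_and, range_all_zip _ _ h]
    rw [show "_".toList = ['_'] from rfl, splitOn_eq_mySplit, segLoop_eq_zip _ _ h]
  · rw [if_neg h, if_pos (by simpa using h)]
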